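-- pv_equiv track=rewrite | github.com/qinguoyi/CodeCraft2019_HUAWEI2019 | CodeCraft-2019/src/CodeCraft-2019.py | creatInitialGraphAndCrossToRoad
-- ===== SOURCE A (Python) =====
-- INFDEFAULT = 100000
--
-- def creatInitialGraphAndCrossToRoad(numOfCrossInfoDict, roadInfoListAll, crossIndexNumDict):
--     crossToRoad = []
--     graphWeight = []
--     Graph = []
--
--     crossToRoad = [[-1 for i in range(numOfCrossInfoDict + 1)] for j in range(numOfCrossInfoDict + 1)]
--     for i in range(0,numOfCrossInfoDict + 1):
--         for j in range(0, numOfCrossInfoDict + 1):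
--             crossToRoad[i][j] = 0
--
--     graphWeight = [[-1 for i in range(numOfCrossInfoDict + 1)] for j in range(numOfCrossInfoDict + 1)]
--     for i in range(0,numOfCrossInfoDict + 1):
--         for j in range(0, numOfCrossInfoDict + 1):
--             if i != j:
--                 graphWeight[i][j] = INFDEFAULT
--             else:
--                 graphWeight[i][j] = 0
--
--     # 对邻接矩阵和权重矩阵赋值
--     roadInfoListAllSize = len(roadInfoListAll)
--     for m in range(0, roadInfoListAllSize):
--         indexNumx = crossIndexNumDict[roadInfoListAll[m]['begin']]
--         indexNumy = crossIndexNumDict[roadInfoListAll[m]['end']]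
--
--         crossToRoad[indexNumx][indexNumy] = roadInfoListAll[m]['id']
--         graphWeight[indexNumx][indexNumy] = roadInfoListAll[m]['length']
--
--     # 创建图
--     graphWeightRowSize = len(graphWeight)
--     graphWeightColSize = len(graphWeight[0])
--     for m in range(0, graphWeightRowSize):
--         for n in range(0, graphWeightColSize):
--             if m != n and graphWeight[m][n] != INFDEFAULT:
--                 weightMN = graphWeight[m][n]
--                 Graph.append((m, n, weightMN))
--     return Graph, crossToRoad
-- ===== SOURCE B (Python) =====
-- INFDEFAULT = 100000
--
-- def creatInitialGraphAndCrossToRoad(numOfCrossInfoDict, roadInfoListAll, crossIndexNumDict):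
--     n = numOfCrossInfoDict + 1
--     crossToRoad = [[0] * n for _ in range(n)]
--     weight = {}
--     for road in roadInfoListAll:
--         x = crossIndexNumDict[road['begin']]
--         y = crossIndexNumDict[road['end']]
--         crossToRoad[x][y] = road['id']
--         weight[(x, y)] = road['length']
--     Graph = [(x, y, w) for (x, y), w in sorted(weight.items())
--              if x != y and w != INFDEFAULT]
--     return Graph, crossToRoad
-- ===== Notes on version B (the rewrite author's own statement) =====
-- stated objective: faster
-- what changed: B drops the graphWeight matrix and its full row-major rescan: a single pass over the roads fills crossToRoad and a (x,y)->length dict (later roads overwrite), and Graph is produced by filtering the lexicographically sorted dict items for x != y and length != INFDEFAULT.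
import Mathlib
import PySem

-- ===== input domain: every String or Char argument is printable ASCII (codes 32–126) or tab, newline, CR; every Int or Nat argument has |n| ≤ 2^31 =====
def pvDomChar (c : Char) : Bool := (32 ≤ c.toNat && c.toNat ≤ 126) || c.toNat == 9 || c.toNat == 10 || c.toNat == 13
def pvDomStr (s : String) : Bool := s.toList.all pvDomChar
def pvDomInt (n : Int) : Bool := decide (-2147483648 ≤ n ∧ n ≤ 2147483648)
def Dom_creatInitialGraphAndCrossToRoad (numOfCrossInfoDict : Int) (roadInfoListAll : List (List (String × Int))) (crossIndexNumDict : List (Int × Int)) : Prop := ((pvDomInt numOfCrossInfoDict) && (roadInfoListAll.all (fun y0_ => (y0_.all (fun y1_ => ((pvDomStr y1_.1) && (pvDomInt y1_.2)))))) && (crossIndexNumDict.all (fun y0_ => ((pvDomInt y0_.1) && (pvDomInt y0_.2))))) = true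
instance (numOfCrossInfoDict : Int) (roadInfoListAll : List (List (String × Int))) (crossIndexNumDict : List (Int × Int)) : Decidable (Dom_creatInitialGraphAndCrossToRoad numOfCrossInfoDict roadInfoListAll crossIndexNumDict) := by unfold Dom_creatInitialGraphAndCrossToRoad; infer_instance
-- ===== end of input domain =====

-- B drops the graphWeight matrix and its full row-major rescan: one pass over the roads fills
-- crossToRoad and a (x,y)->length dict (later roads overwrite), and Graph is the lexicographically
-- sorted dict items filtered for x != y and length != INFDEFAULT (objective: faster by a constant factor).

-- shared helpers: mat[i][j] read/write and the per-road lookups both Pythons perform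
-- pvGet2 mat i j = mat[i][j]; exact for in-range non-negative i, j (all uses below are)
def pvGet2 (mat : List (List Int)) (i j : Int) : Int :=
  PySem.List.pyGetD (PySem.List.pyGetD mat i []) j (-1)

-- pvSet2 mat i j v = mat with mat[i][j] = v; exact for in-range non-negative i, j
def pvSet2 (mat : List (List Int)) (i j : Int) (v : Int) : List (List Int) :=
  PySem.List.pySetD mat i (PySem.List.pySetD (PySem.List.pyGetD mat i []) j v)

-- (crossIndexNumDict[r['begin']], crossIndexNumDict[r['end']], r['id'], r['length']);
-- none = a KeyError in Python (excluded by Pre_)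
def pvRoadGet (r : List (String × Int)) (cid : List (Int × Int)) : Option (Int × Int × Int × Int) :=
  match (PySem.Dict.mk r).get? "begin", (PySem.Dict.mk r).get? "end",
        (PySem.Dict.mk r).get? "id", (PySem.Dict.mk r).get? "length" with
  | some b, some e, some rid, some rlen =>
    match (PySem.Dict.mk cid).get? b, (PySem.Dict.mk cid).get? e with
    | some x, some y => some (x, y, rid, rlen)
    | _, _ => none
  | _, _, _, _ => none

-- ===== PORT A =====
def creatInitialGraphAndCrossToRoad (numOfCrossInfoDict : Int) (roadInfoListAll : List (List (String × Int))) (crossIndexNumDict : List (Int × Int)) : (List (Int × Int × Int)) × List (List Int) :=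
  let INFDEFAULT : Int := 100000
  let crossToRoad0 := (PySem.List.pyRange 0 (numOfCrossInfoDict + 1) 1).map
      (fun _ => (PySem.List.pyRange 0 (numOfCrossInfoDict + 1) 1).map (fun _ => (-1 : Int)))
  let crossToRoad1 := (PySem.List.pyRange 0 (numOfCrossInfoDict + 1) 1).foldl (fun mat i =>
      (PySem.List.pyRange 0 (numOfCrossInfoDict + 1) 1).foldl (fun mat j => pvSet2 mat i j 0) mat) crossToRoad0
  let graphWeight0 := (PySem.List.pyRange 0 (numOfCrossInfoDict + 1) 1).map
      (fun _ => (PySem.List.pyRange 0 (numOfCrossInfoDict + 1) 1).map (fun _ => (-1 : Int)))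
  let graphWeight1 := (PySem.List.pyRange 0 (numOfCrossInfoDict + 1) 1).foldl (fun mat i =>
      (PySem.List.pyRange 0 (numOfCrossInfoDict + 1) 1).foldl
        (fun mat j => pvSet2 mat i j (if i ≠ j then INFDEFAULT else 0)) mat) graphWeight0
  let st := roadInfoListAll.foldl (fun (st : List (List Int) × List (List Int)) r =>
      match pvRoadGet r crossIndexNumDict with
      | some (x, y, rid, rlen) => (pvSet2 st.1 x y rid, pvSet2 st.2 x y rlen)
      | none => st) (crossToRoad1, graphWeight1)
  let graphWeightRowSize : Int := PySem.List.len st.2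
  let graphWeightColSize : Int := PySem.List.len (PySem.List.pyGetD st.2 0 [])
  let graph := (PySem.List.pyRange 0 graphWeightRowSize 1).foldl (fun g m =>
      (PySem.List.pyRange 0 graphWeightColSize 1).foldl (fun g n =>
        if m ≠ n ∧ pvGet2 st.2 m n ≠ INFDEFAULT then g ++ [(m, n, pvGet2 st.2 m n)] else g) g) []
  (graph, st.1)

-- ===== PORT B =====
def creatInitialGraphAndCrossToRoad_alt (numOfCrossInfoDict : Int) (roadInfoListAll : List (List (String × Int))) (crossIndexNumDict : List (Int × Int)) : (List (Int × Int × Int)) × List (List Int) :=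
  let INFDEFAULT : Int := 100000
  let n := numOfCrossInfoDict + 1
  let cross0 := (PySem.List.pyRange 0 n 1).map (fun _ => PySem.List.pyRepeat [(0 : Int)] n)
  let st := roadInfoListAll.foldl (fun (st : List (List Int) × PySem.Dict (Int × Int) Int) r =>
      match pvRoadGet r crossIndexNumDict with
      | some (x, y, rid, rlen) => (pvSet2 st.1 x y rid, st.2.insert (x, y) rlen)
      | none => st) (cross0, PySem.Dict.empty)
  -- sorted(weight.items()): the keys are distinct, so Python's tuple order is the lexicographic key order
  let items := PySem.List.sorted2 st.2.items (fun p => p.1.1) (fun p => p.1.2) false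
  let graph := (items.filter (fun p => decide (p.1.1 ≠ p.1.2 ∧ p.2 ≠ INFDEFAULT))).map
      (fun p => (p.1.1, p.1.2, p.2))
  (graph, st.1)

-- ===== PRECONDITION & SPEC =====
-- one road is admissible: all four keys present and both endpoints mapped to cross indices in [0, num]
def pvRoadOK (num : Int) (cid : List (Int × Int)) (r : List (String × Int)) : Bool :=
  match pvRoadGet r cid with
  | some (x, y, _, _) => decide (0 ≤ x ∧ x ≤ num ∧ 0 ≤ y ∧ y ≤ num)
  | none => false

-- Pre_ restricts to the function's natural domain: numOfCrossInfoDict ≥ 0 and every road carrying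
-- the four keys with begin/end resolving to cross indices in [0, numOfCrossInfoDict]. Outside it A
-- raises (KeyError / IndexError), except for negative resolved indices in [-(num+1), -1], where A
-- returns via Python's negative-index wraparound — outside the natural domain of a cross index.
def Pre_creatInitialGraphAndCrossToRoad (numOfCrossInfoDict : Int) (roadInfoListAll : List (List (String × Int))) (crossIndexNumDict : List (Int × Int)) : Prop :=
  0 ≤ numOfCrossInfoDict ∧
  ∀ r ∈ roadInfoListAll, pvRoadOK numOfCrossInfoDict crossIndexNumDict r = true

instance (numOfCrossInfoDict : Int) (roadInfoListAll : List (List (String × Int))) (crossIndexNumDict : List (Int × Int)) : Decidable (Pre_creatInitialGraphAndCrossToRoad numOfCrossInfoDict roadInfoListAll crossIndexNumDict) := by unfold Pre_creatInitialGraphAndCrossToRoad; infer_instance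

def pvWitness_creatInitialGraphAndCrossToRoad : Int × (List (List (String × Int))) × (List (Int × Int)) :=
  (1, [[("begin", 1), ("end", 2), ("id", 5), ("length", 7)]], [(1, 0), (2, 1)])

def Spec_creatInitialGraphAndCrossToRoad (numOfCrossInfoDict : Int) (roadInfoListAll : List (List (String × Int))) (crossIndexNumDict : List (Int × Int)) (out : (List (Int × Int × Int)) × List (List Int)) : Prop := out = creatInitialGraphAndCrossToRoad_alt numOfCrossInfoDict roadInfoListAll crossIndexNumDict
instance (numOfCrossInfoDict : Int) (roadInfoListAll : List (List (String × Int))) (crossIndexNumDict : List (Int × Int)) (out : (List (Int × Int × Int)) × List (List Int)) : Decidable (Spec_creatInitialGraphAndCrossToRoad numOfCrossInfoDict roadInfoListAll crossIndexNumDict out) := by unfold Spec_creatInitialGraphAndCrossToRoad; infer_instance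

-- ===== CLAIM (what is proved, stated in full; the proofs are below) =====
def Claim_equal_creatInitialGraphAndCrossToRoad : Prop := ∀ (numOfCrossInfoDict : Int) (roadInfoListAll : List (List (String × Int))) (crossIndexNumDict : List (Int × Int)), Dom_creatInitialGraphAndCrossToRoad numOfCrossInfoDict roadInfoListAll crossIndexNumDict → Pre_creatInitialGraphAndCrossToRoad numOfCrossInfoDict roadInfoListAll crossIndexNumDict → Spec_creatInitialGraphAndCrossToRoad numOfCrossInfoDict roadInfoListAll crossIndexNumDict (creatInitialGraphAndCrossToRoad numOfCrossInfoDict roadInfoListAll crossIndexNumDict)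

-- ===== LEMMAS AND PROOFS =====

-- the cross-matrix, weight-matrix and weight-dict components of the two road loops
def pvFc (cid : List (Int × Int)) (c : List (List Int)) (r : List (String × Int)) : List (List Int) :=
  match pvRoadGet r cid with
  | some (x, y, rid, _) => pvSet2 c x y rid
  | none => c

def pvFg (cid : List (Int × Int)) (g : List (List Int)) (r : List (String × Int)) : List (List Int) :=
  match pvRoadGet r cid with
  | some (x, y, _, rlen) => pvSet2 g x y rlen
  | none => g

def pvFw (cid : List (Int × Int)) (w : PySem.Dict (Int × Int) Int) (r : List (String × Int)) : PySem.Dict (Int × Int) Int :=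
  match pvRoadGet r cid with
  | some (x, y, _, rlen) => w.insert (x, y) rlen
  | none => w

def pvShape (N : Nat) (mat : List (List Int)) : Prop :=
  mat.length = N ∧ ∀ row ∈ mat, row.length = N

lemma pvA_fold_split (cid : List (Int × Int)) (roads : List (List (String × Int))) (c g : List (List Int)) :
    roads.foldl (fun (st : List (List Int) × List (List Int)) r =>
      match pvRoadGet r cid with
      | some (x, y, rid, rlen) => (pvSet2 st.1 x y rid, pvSet2 st.2 x y rlen)
      | none => st) (c, g)
    = (roads.foldl (pvFc cid) c, roads.foldl (pvFg cid) g) := by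
  have h : (fun (st : List (List Int) × List (List Int)) r =>
      match pvRoadGet r cid with
      | some (x, y, rid, rlen) => (pvSet2 st.1 x y rid, pvSet2 st.2 x y rlen)
      | none => st)
      = fun (st : List (List Int) × List (List Int)) r => (pvFc cid st.1 r, pvFg cid st.2 r) := by
    funext st r
    unfold pvFc pvFg
    rcases h : pvRoadGet r cid with _ | ⟨x, y, rid, rlen⟩ <;> simp
  rw [h, PySem.List.foldl_prod_mk (pvFc cid) (pvFg cid)]

lemma pvB_fold_split (cid : List (Int × Int)) (roads : List (List (String × Int))) (c : List (List Int)) (w : PySem.Dict (Int × Int) Int) :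
    roads.foldl (fun (st : List (List Int) × PySem.Dict (Int × Int) Int) r =>
      match pvRoadGet r cid with
      | some (x, y, rid, rlen) => (pvSet2 st.1 x y rid, st.2.insert (x, y) rlen)
      | none => st) (c, w)
    = (roads.foldl (pvFc cid) c, roads.foldl (pvFw cid) w) := by
  have h : (fun (st : List (List Int) × PySem.Dict (Int × Int) Int) r =>
      match pvRoadGet r cid with
      | some (x, y, rid, rlen) => (pvSet2 st.1 x y rid, st.2.insert (x, y) rlen)
      | none => st)
      = fun (st : List (List Int) × PySem.Dict (Int × Int) Int) r => (pvFc cid st.1 r, pvFw cid st.2 r) := by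
    funext st r
    unfold pvFc pvFw
    rcases h : pvRoadGet r cid with _ | ⟨x, y, rid, rlen⟩ <;> simp
  rw [h, PySem.List.foldl_prod_mk (pvFc cid) (pvFw cid)]

lemma pvShape_set2 {N : Nat} {mat : List (List Int)} (hs : pvShape N mat) {i : Int} (j : Int)
    (hi : 0 ≤ i) (hi2 : i < (N : Int)) (v : Int) : pvShape N (pvSet2 mat i j v) := by
  obtain ⟨h1, h2⟩ := hs
  have hlt : i < (mat.length : Int) := by rw [h1]; exact_mod_cast hi2
  unfold pvSet2
  rw [PySem.List.pySetD_of_nonneg mat _ hi, PySem.List.pyGetD_eq_getElem mat [] hi hlt]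
  refine ⟨by simpa using h1, ?_⟩
  intro row hrow
  rcases List.mem_or_eq_of_mem_set hrow with h | h
  · exact h2 row h
  · subst h
    rw [PySem.List.length_pySetD]
    exact h2 _ (List.getElem_mem _)

lemma pvGet2_cast (mat : List (List Int)) (a b : Nat) (ha : a < mat.length)
    (hb : b < (mat[a]'ha).length) : pvGet2 mat a b = (mat[a]'ha)[b]'hb := by
  simp only [pvGet2, PySem.List.pyGetD_natCast]
  rw [List.getD_eq_getElem mat [] ha, List.getD_eq_getElem _ (-1) hb]

lemma pvGet2_set2 {N : Nat} {mat : List (List Int)} (hs : pvShape N mat)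
    {i j p q : Int} (hi : 0 ≤ i) (hi2 : i < (N : Int)) (hj : 0 ≤ j) (hj2 : j < (N : Int))
    (hp : 0 ≤ p) (hp2 : p < (N : Int)) (hq : 0 ≤ q) (hq2 : q < (N : Int)) (v : Int) :
    pvGet2 (pvSet2 mat i j v) p q = if p = i ∧ q = j then v else pvGet2 mat p q := by
  obtain ⟨h1, h2⟩ := hs
  have hiN : i.toNat < mat.length := by omega
  have hpN : p.toNat < mat.length := by omega
  have hrowp : (mat[p.toNat]'hpN).length = N := h2 _ (List.getElem_mem _)
  have hrowi : (mat[i.toNat]'hiN).length = N := h2 _ (List.getElem_mem _)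
  unfold pvGet2 pvSet2
  rw [PySem.List.pySetD_of_nonneg mat _ hi]
  rw [PySem.List.pyGetD_eq_getElem mat [] hi (by omega)]
  rw [PySem.List.pyGetD_eq_getElem
        (mat.set i.toNat (PySem.List.pySetD (mat[i.toNat]'hiN) j v)) [] hp
        (by rw [List.length_set]; omega)]
  rw [PySem.List.pyGetD_eq_getElem mat [] hp (by omega)]
  rw [List.getElem_set]
  by_cases hpi : p = i
  · subst hpi
    rw [if_pos (by omega)]
    rw [PySem.List.pySetD_of_nonneg _ _ hj]
    rw [PySem.List.pyGetD_eq_getElem _ (-1) hq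
          (by simp only [List.length_set]; omega)]
    rw [PySem.List.pyGetD_eq_getElem _ (-1) hq (by omega)]
    rw [List.getElem_set]
    by_cases hqj : q = j
    · rw [if_pos (by omega), if_pos ⟨rfl, hqj⟩]
    · rw [if_neg (by omega), if_neg (by tauto)]
  · rw [if_neg (by omega), if_neg (by tauto)]

lemma pvFillRow (N : Nat) (g : Int → Int) (i : Int) (hi : 0 ≤ i) (hi2 : i < (N : Int)) :
    ∀ (b : Nat), b ≤ N → ∀ (mat : List (List Int)), pvShape N mat →
    pvShape N ((PySem.List.pyRange 0 (b : Int) 1).foldl (fun m j => pvSet2 m i j (g j)) mat) ∧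
    ∀ p q : Int, 0 ≤ p → p < (N : Int) → 0 ≤ q → q < (N : Int) →
      pvGet2 ((PySem.List.pyRange 0 (b : Int) 1).foldl (fun m j => pvSet2 m i j (g j)) mat) p q
        = if p = i ∧ q < (b : Int) then g q else pvGet2 mat p q := by
  intro b
  induction b with
  | zero =>
    intro _ mat hs
    rw [show ((0 : Nat) : Int) = 0 from rfl, PySem.List.pyRange_one_eq_nil (le_refl 0)]
    refine ⟨hs, ?_⟩
    intro p q hp hp2 hq hq2
    rw [if_neg (by omega), List.foldl_nil]
  | succ b ih =>
    intro hb mat hs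
    obtain ⟨ihs, ihg⟩ := ih (by omega) mat hs
    rw [show ((b + 1 : Nat) : Int) = (b : Int) + 1 by push_cast; ring,
        PySem.List.pyRange_one_succ_right (by positivity), List.foldl_append, List.foldl_cons,
        List.foldl_nil]
    have hbN : (b : Int) < (N : Int) := by exact_mod_cast (by omega : b < N)
    refine ⟨pvShape_set2 ihs _ hi hi2 _, ?_⟩
    intro p q hp hp2 hq hq2
    rw [pvGet2_set2 ihs hi hi2 (by positivity) hbN hp hp2 hq hq2, ihg p q hp hp2 hq hq2]
    by_cases h1 : p = i ∧ q = (b : Int)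
    · rw [if_pos h1, if_pos ⟨h1.1, by omega⟩, h1.2]
    · rw [if_neg h1]
      by_cases h2 : p = i ∧ q < (b : Int)
      · rw [if_pos h2, if_pos ⟨h2.1, by omega⟩]
      · rw [if_neg h2, if_neg (by omega)]

lemma pvFill (N : Nat) (f : Int → Int → Int) :
    ∀ (a : Nat), a ≤ N → ∀ (mat : List (List Int)), pvShape N mat →
    pvShape N ((PySem.List.pyRange 0 (a : Int) 1).foldl (fun m i =>
        (PySem.List.pyRange 0 (N : Int) 1).foldl (fun m j => pvSet2 m i j (f i j)) m) mat) ∧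
    ∀ p q : Int, 0 ≤ p → p < (N : Int) → 0 ≤ q → q < (N : Int) →
      pvGet2 ((PySem.List.pyRange 0 (a : Int) 1).foldl (fun m i =>
        (PySem.List.pyRange 0 (N : Int) 1).foldl (fun m j => pvSet2 m i j (f i j)) m) mat) p q
        = if p < (a : Int) then f p q else pvGet2 mat p q := by
  intro a
  induction a with
  | zero =>
    intro _ mat hs
    rw [show ((0 : Nat) : Int) = 0 from rfl, PySem.List.pyRange_one_eq_nil (le_refl 0)]
    refine ⟨hs, ?_⟩
    intro p q hp hp2 hq hq2
    rw [if_neg (by omega), List.foldl_nil]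
  | succ a ih =>
    intro ha mat hs
    obtain ⟨ihs, ihg⟩ := ih (by omega) mat hs
    rw [show ((a + 1 : Nat) : Int) = (a : Int) + 1 by push_cast; ring,
        PySem.List.pyRange_one_succ_right (by positivity), List.foldl_append, List.foldl_cons,
        List.foldl_nil]
    have haN : (a : Int) < (N : Int) := by exact_mod_cast (by omega : a < N)
    obtain ⟨rs, rg⟩ := pvFillRow N (f (a : Int)) (a : Int) (by positivity) haN N (le_refl N) _ ihs
    refine ⟨rs, ?_⟩
    intro p q hp hp2 hq hq2
    rw [rg p q hp hp2 hq hq2, ihg p q hp hp2 hq hq2]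
    by_cases h1 : p = (a : Int)
    · rw [if_pos ⟨h1, hq2⟩, if_pos (by omega : p < (a : Int) + 1), h1]
    · rw [if_neg (by simp [h1])]
      by_cases h2 : p < (a : Int)
      · rw [if_pos h2, if_pos (by omega)]
      · rw [if_neg h2, if_neg (by omega)]

lemma pvShape_replicate (N : Nat) (v : Int) : pvShape N (List.replicate N (List.replicate N v)) := by
  refine ⟨by simp, ?_⟩
  intro row h
  rw [List.eq_of_mem_replicate h]
  simp

lemma pvMatrix_ext {N : Nat} {mat mat' : List (List Int)} (h1 : pvShape N mat) (h2 : pvShape N mat')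
    (hc : ∀ p q : Int, 0 ≤ p → p < (N : Int) → 0 ≤ q → q < (N : Int) → pvGet2 mat p q = pvGet2 mat' p q) :
    mat = mat' := by
  apply List.ext_getElem (by rw [h1.1, h2.1])
  intro a ha ha'
  apply List.ext_getElem (by rw [h1.2 _ (List.getElem_mem _), h2.2 _ (List.getElem_mem _)])
  intro b hb hb'
  rw [← pvGet2_cast mat a b ha hb, ← pvGet2_cast mat' a b ha' hb']
  have haN : a < N := by rw [← h1.1]; exact ha
  have hbN : b < N := by rw [← h1.2 _ (List.getElem_mem _)]; exact hb
  exact hc a b (by positivity) (by exact_mod_cast haN) (by positivity) (by exact_mod_cast hbN)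

lemma pvRoadOK_spec {num : Int} {cid : List (Int × Int)} {r : List (String × Int)}
    (h : pvRoadOK num cid r = true) :
    ∃ x y rid rlen, pvRoadGet r cid = some (x, y, rid, rlen) ∧
      0 ≤ x ∧ x ≤ num ∧ 0 ≤ y ∧ y ≤ num := by
  unfold pvRoadOK at h
  rcases hr : pvRoadGet r cid with _ | ⟨x, y, rid, rlen⟩
  · rw [hr] at h; exact absurd h (by simp)
  · rw [hr] at h
    simp only [decide_eq_true_eq] at h
    exact ⟨x, y, rid, rlen, rfl, h.1, h.2.1, h.2.2.1, h.2.2.2⟩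

-- invariant of the road loop: the weight matrix of A is the weight dict of B read with
-- default 0 on the diagonal / 100000 off it, keys stay distinct and inside the grid
lemma pvRoadFold_inv (num : Int) (cid : List (Int × Int)) (N : Nat) (hN : (N : Int) = num + 1) :
    ∀ (roads : List (List (String × Int))), (∀ r ∈ roads, pvRoadOK num cid r = true) →
    ∀ (gw : List (List Int)) (w : PySem.Dict (Int × Int) Int), pvShape N gw → w.keys.Nodup →
    (∀ k ∈ w.keys, 0 ≤ k.1 ∧ k.1 < (N : Int) ∧ 0 ≤ k.2 ∧ k.2 < (N : Int)) →
    (∀ p q : Int, 0 ≤ p → p < (N : Int) → 0 ≤ q → q < (N : Int) →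
        pvGet2 gw p q = ((w.get? (p, q)).getD (if p = q then 0 else 100000))) →
    pvShape N (roads.foldl (pvFg cid) gw) ∧ (roads.foldl (pvFw cid) w).keys.Nodup ∧
    (∀ k ∈ (roads.foldl (pvFw cid) w).keys, 0 ≤ k.1 ∧ k.1 < (N : Int) ∧ 0 ≤ k.2 ∧ k.2 < (N : Int)) ∧
    (∀ p q : Int, 0 ≤ p → p < (N : Int) → 0 ≤ q → q < (N : Int) →
        pvGet2 (roads.foldl (pvFg cid) gw) p q
          = (((roads.foldl (pvFw cid) w).get? (p, q)).getD (if p = q then 0 else 100000))) := by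
  intro roads
  induction roads with
  | nil =>
    intro _ gw w hs hk hg hrel
    exact ⟨hs, hk, hg, hrel⟩
  | cons r rest ih =>
    intro hOK gw w hs hk hg hrel
    obtain ⟨x, y, rid, rlen, hr, hx0, hx1, hy0, hy1⟩ := pvRoadOK_spec (hOK r (by simp))
    have hxN : x < (N : Int) := by omega
    have hyN : y < (N : Int) := by omega
    simp only [List.foldl_cons]
    have hfg : pvFg cid gw r = pvSet2 gw x y rlen := by unfold pvFg; rw [hr]
    have hfw : pvFw cid w r = w.insert (x, y) rlen := by unfold pvFw; rw [hr]
    rw [hfg, hfw]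
    apply ih (fun r' hr' => hOK r' (List.mem_cons_of_mem _ hr'))
    · exact pvShape_set2 hs _ hx0 hxN _
    · exact PySem.Dict.nodup_keys_insert _ _ _ hk
    · intro k hkmem
      rcases (PySem.Dict.mem_keys_insert _ _ _ _).mp hkmem with h | h
      · rw [h]; exact ⟨hx0, hxN, hy0, hyN⟩
      · exact hg k h
    · intro p q hp hp2 hq hq2
      rw [pvGet2_set2 hs hx0 hxN hy0 hyN hp hp2 hq hq2,
          PySem.Dict.get?_insert]
      by_cases hc : p = x ∧ q = y
      · rw [if_pos hc, if_pos (by rw [hc.1, hc.2]), Option.getD_some]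
      · rw [if_neg hc, if_neg (by simp only [Prod.mk.injEq]; tauto),
            hrel p q hp hp2 hq hq2]

lemma pvSorted2_eq_sorted_lex (xs : List ((Int × Int) × Int)) :
    PySem.List.sorted2 xs (fun p => p.1.1) (fun p => p.1.2) false
      = PySem.List.sorted xs (fun p => toLex (p.1.1, p.1.2)) false := by
  unfold PySem.List.sorted2 PySem.List.sorted
  have hlt : (fun (a b : (Int × Int) × Int) =>
        (decide (a.1.1 < b.1.1) || (!decide (b.1.1 < a.1.1) && decide (a.1.2 < b.1.2))))
      = (fun (a b : (Int × Int) × Int) => decide (toLex (a.1.1, a.1.2) < toLex (b.1.1, b.1.2))) := by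
    funext a b
    by_cases h1 : a.1.1 < b.1.1 <;> by_cases h2 : b.1.1 < a.1.1 <;> by_cases h3 : a.1.2 < b.1.2 <;>
      simp [h1, h2, h3, Prod.Lex.toLex_lt_toLex] <;> omega
  simp only [if_neg (by simp : ¬ (false = true))]
  rw [hlt]

-- the grid traversal of the final weight dict, row-major
def pvT (N : Nat) (w : PySem.Dict (Int × Int) Int) : List ((Int × Int) × Int) :=
  (PySem.List.pyRange 0 (N : Int) 1).flatMap (fun m =>
    (PySem.List.pyRange 0 (N : Int) 1).filterMap (fun n =>
      (w.get? (m, n)).map (fun v => ((m, n), v))))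

lemma pvT_pairwise (N : Nat) (w : PySem.Dict (Int × Int) Int) :
    (pvT N w).Pairwise (fun a b => toLex (a.1.1, a.1.2) < toLex (b.1.1, b.1.2)) := by
  unfold pvT
  rw [List.pairwise_flatMap]
  constructor
  · intro m _
    rw [List.pairwise_filterMap]
    refine List.Pairwise.imp ?_ (PySem.List.pairwise_lt_pyRange_one 0 _)
    intro n n' hlt b hb b' hb'
    simp only [Option.map_eq_some_iff] at hb hb'
    obtain ⟨v, hv, rfl⟩ := hb
    obtain ⟨v', hv', rfl⟩ := hb'
    simp [Prod.Lex.toLex_lt_toLex, hlt]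
  · refine List.Pairwise.imp ?_ (PySem.List.pairwise_lt_pyRange_one 0 _)
    intro m m' hlt xx hx yy hy
    simp only [List.mem_filterMap, Option.map_eq_some_iff] at hx hy
    obtain ⟨n, hn, v, hv, rfl⟩ := hx
    obtain ⟨n', hn', v', hv', rfl⟩ := hy
    simp [Prod.Lex.toLex_lt_toLex, hlt]

lemma pvT_mem (N : Nat) (w : PySem.Dict (Int × Int) Int) (p : (Int × Int) × Int) :
    p ∈ pvT N w ↔ (0 ≤ p.1.1 ∧ p.1.1 < (N : Int) ∧ 0 ≤ p.1.2 ∧ p.1.2 < (N : Int) ∧ w.get? p.1 = some p.2) := by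
  unfold pvT
  simp only [List.mem_flatMap, List.mem_filterMap, Option.map_eq_some_iff,
    PySem.List.mem_pyRange_one]
  constructor
  · rintro ⟨m, ⟨hm0, hmN⟩, n, ⟨hn0, hnN⟩, v, hv, rfl⟩
    exact ⟨hm0, hmN, hn0, hnN, hv⟩
  · rintro ⟨h1, h2, h3, h4, h5⟩
    exact ⟨p.1.1, ⟨h1, h2⟩, p.1.2, ⟨h3, h4⟩, p.2, h5, rfl⟩

lemma pvT_perm (N : Nat) (w : PySem.Dict (Int × Int) Int) (hk : w.keys.Nodup)
    (hg : ∀ k ∈ w.keys, 0 ≤ k.1 ∧ k.1 < (N : Int) ∧ 0 ≤ k.2 ∧ k.2 < (N : Int)) :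
    (pvT N w).Perm w.items := by
  have hTpw := pvT_pairwise N w
  have hTnd : (pvT N w).Nodup :=
    hTpw.imp (fun h heq => by rw [heq] at h; exact lt_irrefl _ h)
  have hind : w.items.Nodup := by
    have hkeys := hk
    simp only [PySem.Dict.keys] at hkeys
    exact hkeys.of_map
  rw [List.perm_ext_iff_of_nodup hTnd hind]
  intro p
  rw [pvT_mem]
  constructor
  · rintro ⟨_, _, _, _, h5⟩
    exact (PySem.Dict.get?_eq_some_iff_mem_items w p.1 p.2 hk).mp h5
  · intro hp
    have h5 := (PySem.Dict.get?_eq_some_iff_mem_items w p.1 p.2 hk).mpr hp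
    have hb := hg p.1 (PySem.Dict.mem_keys_of_mem_items w hp)
    exact ⟨hb.1, hb.2.1, hb.2.2.1, hb.2.2.2, h5⟩

lemma pvCol_eq (N : Nat) (gw : List (List Int)) (w : PySem.Dict (Int × Int) Int) (m : Int)
    (hrel : ∀ p q : Int, 0 ≤ p → p < (N : Int) → 0 ≤ q → q < (N : Int) →
        pvGet2 gw p q = ((w.get? (p, q)).getD (if p = q then 0 else 100000))) (hm : 0 ≤ m) (hm2 : m < (N : Int)) :
    ∀ (l : List Int), (∀ n ∈ l, 0 ≤ n ∧ n < (N : Int)) →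
      ((l.filter (fun n => decide (m ≠ n ∧ pvGet2 gw m n ≠ 100000))).map (fun n => (m, n, pvGet2 gw m n)))
        = (((l.filterMap (fun n => (w.get? (m, n)).map (fun v => ((m, n), v)))).filter
              (fun p => decide (p.1.1 ≠ p.1.2 ∧ p.2 ≠ 100000))).map (fun p => (p.1.1, p.1.2, p.2))) := by
  intro l
  induction l with
  | nil => intro _; simp
  | cons n t iht =>
    intro hmem
    obtain ⟨hn0, hnN⟩ := hmem n (List.mem_cons_self ..)
    have ht := iht (fun n' h => hmem n' (List.mem_cons_of_mem _ h))
    have hcell := hrel m n hm hm2 hn0 hnN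
    simp only [List.filter_cons, List.filterMap_cons]
    cases hw : w.get? (m, n) with
    | some v =>
      rw [hw, Option.getD_some] at hcell
      rw [hcell]
      simp only [Option.map_some, List.filter_cons]
      by_cases hc : m ≠ n ∧ v ≠ 100000
      · rw [if_pos (decide_eq_true hc), if_pos (decide_eq_true hc)]
        simp only [List.map_cons]
        rw [hcell, ht]
      · rw [if_neg (by simp [hc]), if_neg (by simp [hc])]
        exact ht
    | none =>
      rw [hw, Option.getD_none] at hcell
      have hno : ¬ (m ≠ n ∧ pvGet2 gw m n ≠ 100000) := by
        by_cases hmn : m = n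
        · exact fun hctr => hctr.1 hmn
        · rw [hcell, if_neg hmn]; exact fun hctr => hctr.2 rfl
      rw [if_neg (by simp [hno])]
      exact ht

lemma pvGet2_replicate (N : Nat) (v : Int) {p q : Int} (hp : 0 ≤ p) (hp2 : p < (N : Int))
    (hq : 0 ≤ q) (hq2 : q < (N : Int)) :
    pvGet2 (List.replicate N (List.replicate N v)) p q = v := by
  unfold pvGet2
  rw [PySem.List.pyGetD_eq_getElem _ [] hp (by simp; omega)]
  rw [List.getElem_replicate]
  rw [PySem.List.pyGetD_eq_getElem _ (-1) hq (by simp; omega)]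
  rw [List.getElem_replicate]

lemma pvMain (num : Int) (roads : List (List (String × Int))) (cid : List (Int × Int))
    (hnum : 0 ≤ num) (hOK : ∀ r ∈ roads, pvRoadOK num cid r = true) :
    creatInitialGraphAndCrossToRoad num roads cid = creatInitialGraphAndCrossToRoad_alt num roads cid := by
  obtain ⟨N, hN⟩ : ∃ N : Nat, (N : Int) = num + 1 := ⟨(num + 1).toNat, by omega⟩
  have hN1 : 1 ≤ N := by omega
  simp only [creatInitialGraphAndCrossToRoad, creatInitialGraphAndCrossToRoad_alt]
  rw [← hN, pvA_fold_split, pvB_fold_split]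
  dsimp only
  -- the two initial cross matrices are the same all-zero N×N matrix
  have hc0A : (PySem.List.pyRange 0 (N : Int) 1).map
        (fun _ => (PySem.List.pyRange 0 (N : Int) 1).map (fun _ => (-1 : Int)))
      = List.replicate N (List.replicate N (-1)) := by
    simp [List.map_const', PySem.List.length_pyRange_one]
  have hc0B : (PySem.List.pyRange 0 (N : Int) 1).map (fun _ => PySem.List.pyRepeat [(0 : Int)] (N : Int))
      = List.replicate N (List.replicate N 0) := by
    simp [PySem.List.pyRepeat_singleton, List.map_const', PySem.List.length_pyRange_one]
  rw [hc0A, hc0B]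
  have h1 := pvFill N (fun _ _ => (0 : Int)) N le_rfl
    (List.replicate N (List.replicate N (-1))) (pvShape_replicate N (-1))
  have hzero : (PySem.List.pyRange 0 (N : Int) 1).foldl (fun mat i =>
        (PySem.List.pyRange 0 (N : Int) 1).foldl (fun mat j => pvSet2 mat i j 0) mat)
        (List.replicate N (List.replicate N (-1)))
      = List.replicate N (List.replicate N 0) := by
    refine pvMatrix_ext h1.1 (pvShape_replicate N 0) ?_
    intro p q hp hp2 hq hq2
    rw [h1.2 p q hp hp2 hq hq2, if_pos hp2, pvGet2_replicate N 0 hp hp2 hq hq2]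
  rw [hzero]
  -- the weight matrix after initialisation
  have h2 := pvFill N (fun i j => if i ≠ j then (100000 : Int) else 0) N le_rfl
    (List.replicate N (List.replicate N (-1))) (pvShape_replicate N (-1))
  -- invariant through the road loop
  obtain ⟨hsF, hkF, hgF, hrelF⟩ := pvRoadFold_inv num cid N hN roads hOK _ PySem.Dict.empty h2.1
    (by rw [PySem.Dict.keys_empty]; exact List.nodup_nil)
    (by intro k hkm; rw [PySem.Dict.keys_empty] at hkm; cases hkm)
    (by
      intro p q hp hp2 hq hq2
      rw [h2.2 p q hp hp2 hq hq2, if_pos hp2, PySem.Dict.get?_empty, Option.getD_none]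
      by_cases hpq : p = q <;> simp [hpq])
  set gwt := roads.foldl (pvFg cid) ((PySem.List.pyRange 0 (N : Int) 1).foldl (fun mat i =>
      (PySem.List.pyRange 0 (N : Int) 1).foldl
        (fun mat j => pvSet2 mat i j (if i ≠ j then 100000 else 0)) mat)
      (List.replicate N (List.replicate N (-1)))) with hgwt
  set wt := roads.foldl (pvFw cid) PySem.Dict.empty with hwt
  have hlen : PySem.List.len gwt = (N : Int) := by rw [PySem.List.len_eq, hsF.1]
  have hcol : PySem.List.len (PySem.List.pyGetD gwt 0 []) = (N : Int) := by
    rw [PySem.List.pyGetD_eq_getElem gwt [] (le_refl 0)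
          (by rw [hsF.1]; exact_mod_cast hN1),
        PySem.List.len_eq, hsF.2 _ (List.getElem_mem _)]
  rw [hlen, hcol]
  -- turn A's double append loop into a flatMap of per-row lists
  have hinner : (fun (g : List (Int × Int × Int)) m =>
        (PySem.List.pyRange 0 (N : Int) 1).foldl (fun g n =>
          if m ≠ n ∧ pvGet2 gwt m n ≠ 100000 then g ++ [(m, n, pvGet2 gwt m n)] else g) g)
      = fun g m => g ++ (((PySem.List.pyRange 0 (N : Int) 1).filter
            (fun n => decide (m ≠ n ∧ pvGet2 gwt m n ≠ 100000))).map
            (fun n => (m, n, pvGet2 gwt m n))) := by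
    funext g m
    exact PySem.List.foldl_append_ite _ _ _ _
  rw [hinner, PySem.List.foldl_append_eq_flatMap, List.nil_append]
  -- B's sorted dict items are exactly the row-major grid traversal of the dict
  have hsorted : PySem.List.sorted2 wt.items (fun p => p.1.1) (fun p => p.1.2) false = pvT N wt := by
    rw [pvSorted2_eq_sorted_lex]
    exact PySem.List.sorted_eq_of_perm_of_pairwise_lt _ _ _ (pvT_perm N wt hkF hgF) (pvT_pairwise N wt)
  rw [hsorted]
  unfold pvT
  rw [List.filter_flatMap, List.map_flatMap]
  refine Prod.ext ?_ rfl
  refine List.flatMap_congr ?_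
  intro m hm
  obtain ⟨hm0, hmN⟩ := PySem.List.mem_pyRange_one.mp hm
  exact pvCol_eq N gwt wt m hrelF hm0 hmN (PySem.List.pyRange 0 (N : Int) 1)
    (fun n hn => ⟨(PySem.List.mem_pyRange_one.mp hn).1, (PySem.List.mem_pyRange_one.mp hn).2⟩)

-- ===== VERDICT (by name: the statement is the Claim_ definition above) =====
theorem creatInitialGraphAndCrossToRoad_spec : Claim_equal_creatInitialGraphAndCrossToRoad := by
  intro num roads cid _ hpre
  exact pvMain num roads cid hpre.1 hpre.2
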